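-- pv_equiv track=rewrite | github.com/tejas-kinare-code/SupportIQ | backend/app/langchain/rag_service.py | _has_low_relevance
-- ===== SOURCE A (Python) =====
-- def _has_low_relevance(response_text: str) -> bool:
--     """Check if response indicates no relevant information found."""
--     negative_indicators = [
--         "i don't see",
--         "i don't have",
--         "not aware",
--         "no information",
--         "doesn't mention",
--         "unable to find",
--         "cannot find",
--         "not available",
--         "not provided"
--     ]
--     response_lower = response_text.lower()
--     return any(indicator in response_lower for indicator in negative_indicators)
-- ===== SOURCE B (Python) =====
-- def _has_low_relevance(response_text: str) -> bool:
--     """Check if response indicates no relevant information found."""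
--     negative_indicators = [
--         "i don't see",
--         "i don't have",
--         "not aware",
--         "no information",
--         "doesn't mention",
--         "unable to find",
--         "cannot find",
--         "not available",
--         "not provided"
--     ]
--     s = response_text.lower()
--     # single position-major pass: at each index, test whether any indicator starts there
--     for i in range(len(s) + 1):
--         for p in negative_indicators:
--             if s.startswith(p, i):
--                 return True
--     return False
-- ===== Notes on version B (the rewrite author's own statement) =====
-- stated objective: alternative
-- what changed: Replaced nine separate substring scans (one 'in' search per indicator) by a single left-to-right pass over positions that at each index tests whether any indicator starts there.
import Mathlib
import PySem

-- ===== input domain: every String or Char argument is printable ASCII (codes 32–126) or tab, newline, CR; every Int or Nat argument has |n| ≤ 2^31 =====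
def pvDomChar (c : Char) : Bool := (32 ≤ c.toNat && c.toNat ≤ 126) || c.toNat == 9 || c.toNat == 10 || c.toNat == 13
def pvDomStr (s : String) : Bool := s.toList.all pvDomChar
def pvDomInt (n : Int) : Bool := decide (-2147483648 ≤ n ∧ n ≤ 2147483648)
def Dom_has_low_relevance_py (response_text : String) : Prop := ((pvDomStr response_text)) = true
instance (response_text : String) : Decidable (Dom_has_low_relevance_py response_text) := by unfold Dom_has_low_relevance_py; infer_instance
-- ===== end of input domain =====

-- B replaces A's nine separate substring scans by one position-major left-to-right pass (alternative decomposition, same cost).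

-- ===== PORT A =====
-- the literal list of indicator strings from A
def pvNegIndicatorsA : List String :=
  ["i don't see", "i don't have", "not aware", "no information", "doesn't mention",
   "unable to find", "cannot find", "not available", "not provided"]

def has_low_relevance_py (response_text : String) : Bool :=
  let response_lower := PySem.Str.lower response_text
  pvNegIndicatorsA.any (fun indicator => PySem.Str.isIn indicator response_lower)

-- ===== PORT B =====
-- same indicator phrases, held as character lists for the positional scan
def pvNegIndicatorsB : List (List Char) :=
  ["i don't see".toList, "i don't have".toList, "not aware".toList, "no information".toList,
   "doesn't mention".toList, "unable to find".toList, "cannot find".toList,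
   "not available".toList, "not provided".toList]

-- one pass over positions of s (including position len(s)): does any indicator start here?
def pvScan : List Char → Bool
  | [] => pvNegIndicatorsB.any (fun p => PySem.Chars.startswith [] p)
  | c :: t =>
      pvNegIndicatorsB.any (fun p => PySem.Chars.startswith (c :: t) p) || pvScan t

def has_low_relevance_py_alt (response_text : String) : Bool :=
  pvScan (PySem.Str.lower response_text).toList

-- ===== PRECONDITION & SPEC =====
def Spec_has_low_relevance_py (response_text : String) (out : Bool) : Prop := out = has_low_relevance_py_alt response_text
instance (response_text : String) (out : Bool) : Decidable (Spec_has_low_relevance_py response_text out) := by unfold Spec_has_low_relevance_py; infer_instance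

-- ===== CLAIM (what is proved, stated in full; the proofs are below) =====
def Claim_equal_has_low_relevance_py : Prop := ∀ (response_text : String), Dom_has_low_relevance_py response_text → Spec_has_low_relevance_py response_text (has_low_relevance_py response_text)

-- ===== LEMMAS AND PROOFS =====

-- the positional scan finds exactly the indicators that occur at some position
theorem pvScan_iff (s : List Char) :
    pvScan s = true ↔ ∃ p ∈ pvNegIndicatorsB, ∃ j, p <+: s.drop j := by
  induction s with
  | nil =>
      simp only [pvScan, List.any_eq_true, PySem.Chars.startswith_iff]
      constructor
      · rintro ⟨p, hp, hpre⟩; exact ⟨p, hp, 0, hpre⟩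
      · rintro ⟨p, hp, j, hpre⟩; exact ⟨p, hp, by simpa using hpre⟩
  | cons c t ih =>
      simp only [pvScan, Bool.or_eq_true, List.any_eq_true, PySem.Chars.startswith_iff, ih]
      constructor
      · rintro (⟨p, hp, hpre⟩ | ⟨p, hp, j, hpre⟩)
        · exact ⟨p, hp, 0, hpre⟩
        · exact ⟨p, hp, j + 1, by simpa using hpre⟩
      · rintro ⟨p, hp, j, hpre⟩
        cases j with
        | zero => exact Or.inl ⟨p, hp, hpre⟩
        | succ k => exact Or.inr ⟨p, hp, k, by simpa using hpre⟩

theorem pvScan_eq_any (s : List Char) :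
    pvScan s = pvNegIndicatorsB.any (fun p => PySem.Chars.isIn p s) := by
  rcases h : pvNegIndicatorsB.any (fun p => PySem.Chars.isIn p s) with _ | _
  · rw [Bool.eq_false_iff]
    intro hs
    rcases (pvScan_iff s).mp hs with ⟨p, hp, j, hpre⟩
    have : PySem.Chars.isIn p s = true :=
      (PySem.Chars.exists_prefix_drop_iff_isIn p s).mp ⟨j, hpre⟩
    simp only [List.any_eq_false] at h
    exact absurd this (by simpa using h p hp)
  · rw [List.any_eq_true] at h
    rcases h with ⟨p, hp, hin⟩
    rcases (PySem.Chars.exists_prefix_drop_iff_isIn p s).mpr hin with ⟨j, hpre⟩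
    exact (pvScan_iff s).mpr ⟨p, hp, j, hpre⟩

-- ===== VERDICT (by name: the statement is the Claim_ definition above) =====
theorem has_low_relevance_py_spec : Claim_equal_has_low_relevance_py := by
  intro response_text _
  unfold Spec_has_low_relevance_py has_low_relevance_py has_low_relevance_py_alt
  rw [pvScan_eq_any]
  simp [pvNegIndicatorsA, pvNegIndicatorsB, PySem.Str.isIn_eq]
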